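-- pv_equiv track=rewrite | github.com/Go0p/galileo | analyze/build_swap_market_demo.py | slice_segments
-- ===== SOURCE A (Python) =====
-- from typing import Dict, List, Optional, Sequence, Tuple
--
-- JUPITER_PROGRAM = "JUP6LkbZbjS1jKKwapdHNy74zcZ3tLUZoi5QNyVTaV4"
--
-- def slice_segments(accounts: List[str], owner_set: set[str]) -> List[Tuple[str, List[str]]]:
--     """返回 (owner_program, accounts_chunk)。"""
--     segments: List[Tuple[str, List[str]]] = []
--     i = 0
--     seen_owner = False
--     while i < len(accounts):
--         account = accounts[i]
--         if account == JUPITER_PROGRAM and seen_owner: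
--             i += 1
--             continue
--         if account.upper() not in owner_set:
--             i += 1
--             continue
--         owner = account
--         seen_owner = True
--         chunk = [owner]
--         j = i + 1
--         while j < len(accounts):
--             current = accounts[j]
--             if current == JUPITER_PROGRAM and seen_owner:
--                 j += 1
--                 continue
--             if current.upper() in owner_set and current != owner:
--                 break
--             chunk.append(current)
--             j += 1
--         segments.append((owner, chunk))
--         i = j
--     return segments
-- ===== SOURCE B (Python) =====
-- JUPITER_PROGRAM = "JUP6LkbZbjS1jKKwapdHNy74zcZ3tLUZoi5QNyVTaV4"
--
-- def slice_segments(accounts, owner_set):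
--     """Single pass maintaining an optional open segment instead of nested i/j pointer loops."""
--     segments = []
--     current = None  # open segment as (owner, chunk), or None
--     seen_owner = False
--     for account in accounts:
--         if account == JUPITER_PROGRAM and seen_owner:
--             continue
--         if account.upper() in owner_set and (current is None or account != current[0]):
--             if current is not None:
--                 segments.append(current)
--             current = (account, [account])
--             seen_owner = True
--         elif current is not None:
--             current[1].append(account)
--     if current is not None:
--         segments.append(current)
--     return segments
-- ===== Notes on version B (the rewrite author's own statement) =====
-- stated objective: simpler
-- what changed: Replaced the nested while loops with i/j index pointers by a single for-loop over the accounts that maintains an optional open (owner, chunk) segment plus the seen_owner flag, flushing the open segment when a new owner starts and once at the end.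
import Mathlib
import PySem

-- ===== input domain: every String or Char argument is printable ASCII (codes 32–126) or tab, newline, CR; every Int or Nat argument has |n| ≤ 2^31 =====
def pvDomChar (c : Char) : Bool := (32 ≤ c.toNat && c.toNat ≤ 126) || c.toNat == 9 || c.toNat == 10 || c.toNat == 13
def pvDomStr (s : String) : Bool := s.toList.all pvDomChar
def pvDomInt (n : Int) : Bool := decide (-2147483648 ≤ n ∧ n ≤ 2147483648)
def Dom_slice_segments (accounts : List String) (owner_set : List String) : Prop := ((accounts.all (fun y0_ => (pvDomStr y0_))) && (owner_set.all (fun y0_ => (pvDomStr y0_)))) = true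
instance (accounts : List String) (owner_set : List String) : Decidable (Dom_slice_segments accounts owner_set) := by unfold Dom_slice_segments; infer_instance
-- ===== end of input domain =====

-- B is a simpler single-pass rewrite: one loop with an optional open segment replaces A's nested while loops with i/j index pointers; return values are identical.

def pvJUP : String := "JUP6LkbZbjS1jKKwapdHNy74zcZ3tLUZoi5QNyVTaV4"

-- ===== PORT A =====
-- inner while loop of A: walks `rest`, appending to `chunk`, skipping JUPITER
-- (seen_owner is always true inside the inner loop), breaking at a different owner;
-- returns (chunk, remaining suffix at the break point).
def sliceInnerA (owner_set : List String) (owner : String) (chunk : List String)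
    (rest : List String) : List String × List String :=
  match rest with
  | [] => (chunk, [])
  | current :: rest' =>
    if current = pvJUP then sliceInnerA owner_set owner chunk rest'
    else if PySem.Str.upper current ∈ owner_set ∧ current ≠ owner then (chunk, current :: rest')
    else sliceInnerA owner_set owner (chunk ++ [current]) rest'

theorem sliceInnerA_len (owner_set : List String) (owner : String) (chunk : List String)
    (rest : List String) : (sliceInnerA owner_set owner chunk rest).2.length ≤ rest.length := by
  induction rest generalizing chunk with
  | nil => simp [sliceInnerA]
  | cons current rest' ih =>
    simp only [sliceInnerA]
    split
    · exact le_trans (ih _) (Nat.le_succ _)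
    · split
      · simp
      · exact le_trans (ih _) (Nat.le_succ _)

-- outer while loop of A
def sliceOuterA (owner_set : List String) (rest : List String) (seen_owner : Bool) :
    List (String × List String) :=
  match rest with
  | [] => []
  | account :: rest' =>
    if account = pvJUP ∧ seen_owner = true then sliceOuterA owner_set rest' seen_owner
    else if PySem.Str.upper account ∉ owner_set then sliceOuterA owner_set rest' seen_owner
    else
      let r := sliceInnerA owner_set account [account] rest'
      (account, r.1) :: sliceOuterA owner_set r.2 true
termination_by rest.length
decreasing_by
  · simp
  · simp
  · exact Nat.lt_succ_of_le (by simpa using sliceInnerA_len owner_set account [account] rest')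

def slice_segments (accounts : List String) (owner_set : List String) : List (String × List String) :=
  sliceOuterA owner_set accounts false

-- ===== PORT B =====
-- B's loop body: state = (segments so far, optional open segment (owner, chunk), seen_owner)
def sliceStepB (owner_set : List String)
    (st : List (String × List String) × Option (String × List String) × Bool)
    (account : String) : List (String × List String) × Option (String × List String) × Bool :=
  let (segments, current, seen_owner) := st
  if account = pvJUP ∧ seen_owner = true then st
  else if PySem.Str.upper account ∈ owner_set ∧ (∀ c ∈ current, account ≠ c.1) then
    (match current with
     | none => segments
     | some c => segments ++ [c], some (account, [account]), true)
  else
    match current with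
    | none => st
    | some c => (segments, some (c.1, c.2 ++ [account]), seen_owner)

def slice_segments_alt (accounts : List String) (owner_set : List String) : List (String × List String) :=
  let r := accounts.foldl (sliceStepB owner_set) ([], none, false)
  match r.2.1 with
  | none => r.1
  | some c => r.1 ++ [c]

-- ===== PRECONDITION & SPEC =====
def Spec_slice_segments (accounts : List String) (owner_set : List String) (out : List (String × List String)) : Prop := out = slice_segments_alt accounts owner_set
instance (accounts : List String) (owner_set : List String) (out : List (String × List String)) : Decidable (Spec_slice_segments accounts owner_set out) := by unfold Spec_slice_segments; infer_instance

-- ===== CLAIM (what is proved, stated in full; the proofs are below) =====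
def Claim_equal_slice_segments : Prop := ∀ (accounts : List String) (owner_set : List String), Dom_slice_segments accounts owner_set → Spec_slice_segments accounts owner_set (slice_segments accounts owner_set)

-- ===== LEMMAS AND PROOFS =====

-- finalize B's fold state into the returned list
def sliceFinB (st : List (String × List String) × Option (String × List String) × Bool) :
    List (String × List String) :=
  match st.2.1 with
  | none => st.1
  | some c => st.1 ++ [c]

theorem sliceB_inner (owner_set : List String) (rest : List String) :
    ∀ (segs : List (String × List String)) (owner : String) (chunk : List String),
    sliceFinB (rest.foldl (sliceStepB owner_set) (segs, some (owner, chunk), true))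
      = segs ++ (owner, (sliceInnerA owner_set owner chunk rest).1)
          :: sliceOuterA owner_set (sliceInnerA owner_set owner chunk rest).2 true := by
  induction rest with
  | nil => intro segs owner chunk; simp [sliceInnerA, sliceOuterA, sliceFinB]
  | cons current rest' ih =>
    intro segs owner chunk
    simp only [List.foldl_cons]
    by_cases hj : current = pvJUP
    · rw [show sliceStepB owner_set (segs, some (owner, chunk), true) current
            = (segs, some (owner, chunk), true) from by simp [sliceStepB, hj]]
      rw [ih]
      simp [sliceInnerA, hj]
    · by_cases hb : PySem.Str.upper current ∈ owner_set ∧ current ≠ owner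
      · rw [show sliceStepB owner_set (segs, some (owner, chunk), true) current
              = (segs ++ [(owner, chunk)], some (current, [current]), true) from by
            simp [sliceStepB, hj, hb.1, hb.2]]
        rw [ih]
        rw [show sliceInnerA owner_set owner chunk (current :: rest')
              = (chunk, current :: rest') from by simp [sliceInnerA, hj, hb]]
        rw [show sliceOuterA owner_set (current :: rest') true
              = (current, (sliceInnerA owner_set current [current] rest').1)
                  :: sliceOuterA owner_set (sliceInnerA owner_set current [current] rest').2 true from by
            rw [sliceOuterA]; simp [hj, hb.1]]
        simp
      · rw [show sliceStepB owner_set (segs, some (owner, chunk), true) current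
              = (segs, some (owner, chunk ++ [current]), true) from by
            simp only [sliceStepB]
            rw [if_neg (by simp [hj]), if_neg (by simpa using hb)]]
        rw [ih]
        simp [sliceInnerA, hj, hb]

theorem sliceB_outer (owner_set : List String) (rest : List String) :
    sliceFinB (rest.foldl (sliceStepB owner_set) ([], none, false))
      = sliceOuterA owner_set rest false := by
  induction rest with
  | nil => simp [sliceOuterA, sliceFinB]
  | cons account rest' ih =>
    simp only [List.foldl_cons]
    by_cases hm : PySem.Str.upper account ∈ owner_set
    · rw [show sliceStepB owner_set ([], none, false) account
            = ([], some (account, [account]), true) from by simp [sliceStepB, hm]]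
      rw [sliceB_inner]
      rw [sliceOuterA]
      simp [hm]
    · rw [show sliceStepB owner_set ([], none, false) account
            = ([], none, false) from by simp [sliceStepB, hm]]
      rw [ih]
      rw [sliceOuterA]
      simp [hm]

-- ===== VERDICT (by name: the statement is the Claim_ definition above) =====
theorem slice_segments_spec : Claim_equal_slice_segments := by
  intro accounts owner_set _
  unfold Spec_slice_segments slice_segments slice_segments_alt
  simpa [sliceFinB] using (sliceB_outer owner_set accounts).symm
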